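-- pv_equiv track=rewrite | github.com/ManuelMartinez4102/Teo | teo.py | codificar_huffman
-- ===== SOURCE A (Python) =====
-- import heapq
-- from collections import defaultdict
--
-- def calcular_frecuencias(cadena):
--     frecuencias = defaultdict(int)
--     for numero in cadena:
--         frecuencias[numero] += 1
--     return frecuencias
--
-- def construir_arbol_huffman(frecuencias):
--     heap = [[frecuencia, [numero, ""]] for numero, frecuencia in frecuencias.items()]
--     heapq.heapify(heap)
--
--     while len(heap) > 1:
--         lo = heapq.heappop(heap)
--         hi = heapq.heappop(heap)
--         for par in lo[1:]:
--             par[1] = '0' + par[1]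
--         for par in hi[1:]:
--             par[1] = '1' + par[1]
--         heapq.heappush(heap, [lo[0] + hi[0]] + lo[1:] + hi[1:])
--
--     return sorted(heapq.heappop(heap)[1:], key=lambda p: (len(p[-1]), p))
--
-- def codificar_huffman(cadena):
--     frecuencias = calcular_frecuencias(cadena)
--     arbol_huffman = construir_arbol_huffman(frecuencias)
--
--     codigos = {}
--     for numero, codigo in arbol_huffman:
--         codigos[numero] = codigo
--
--     cadena_codificada = ''.join([codigos[numero] for numero in cadena])
--
--     return cadena_codificada, codigos
-- ===== SOURCE B (Python) =====
-- import heapq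
-- from collections import Counter
--
-- def codificar_huffman(cadena):
--     # Build real tree nodes during the merges, then assign all codes in one DFS,
--     # instead of re-prefixing every symbol's code at every merge.
--     frec = Counter(cadena)
--     arboles = {ch: ch for ch in frec}        # char -> tree; a leaf is the char itself, a node a (left, right) pair
--     heap = [(f, ch) for ch, f in frec.items()]
--     heapq.heapify(heap)
--     while len(heap) > 1:
--         f1, c1 = heapq.heappop(heap)
--         f2, c2 = heapq.heappop(heap)
--         t2 = arboles.pop(c2)
--         arboles[c1] = (arboles[c1], t2)
--         heapq.heappush(heap, (f1 + f2, c1))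
--     raiz = arboles[heap[0][1]]
--     pares = []
--     def dfs(t, codigo):
--         if isinstance(t, str):
--             pares.append((t, codigo))
--         else:
--             dfs(t[0], codigo + '0')
--             dfs(t[1], codigo + '1')
--     dfs(raiz, '')
--     codigos = dict(sorted(pares, key=lambda p: (len(p[1]), p)))
--     cadena_codificada = ''.join(codigos[ch] for ch in cadena)
--     return cadena_codificada, codigos
-- ===== Notes on version B (the rewrite author's own statement) =====
-- stated objective: alternative
-- what changed: A's heap elements carry every symbol's code pair and re-prefix all of them at each merge; B keeps only (freq, char) keys on the heap, merges real tree nodes in a char-indexed dict, and assigns all codes in a single DFS at the end, preserving A's exact pop order because (freq, leading char) determines every heap comparison.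
import Mathlib
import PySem

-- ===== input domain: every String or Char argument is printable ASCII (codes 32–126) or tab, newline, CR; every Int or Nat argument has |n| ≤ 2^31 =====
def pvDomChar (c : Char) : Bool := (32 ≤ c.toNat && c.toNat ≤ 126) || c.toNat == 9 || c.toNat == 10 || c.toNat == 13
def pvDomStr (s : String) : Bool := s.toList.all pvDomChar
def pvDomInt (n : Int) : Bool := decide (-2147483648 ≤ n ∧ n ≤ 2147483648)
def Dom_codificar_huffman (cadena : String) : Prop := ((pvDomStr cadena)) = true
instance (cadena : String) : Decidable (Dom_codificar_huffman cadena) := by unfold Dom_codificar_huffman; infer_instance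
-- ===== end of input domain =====

-- B replaces A's per-merge rebuilding of every symbol's code prefix by real tree nodes
-- merged on the heap and a single DFS assigning all codes at the end (same pop order).

-- ===== PORT A =====
-- Shared helper: a literal transliteration of CPython's heapq (_siftdown, _siftup,
-- heappush, heappop, heapify), parametrised by the element comparison `lt`
-- (Python's `<` on the heap's element type). Used by both ports, as both Pythons
-- call the same heapq library.

def hpSiftdown {α : Type} (lt : α → α → Bool) (newitem : α) (heap : List α)
    (startpos pos : Nat) : List α :=
  if _h : startpos < pos then
    let parentpos := (pos - 1) / 2
    let parent := heap.getD parentpos newitem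
    if lt newitem parent then
      hpSiftdown lt newitem (heap.set pos parent) startpos parentpos
    else heap.set pos newitem
  else heap.set pos newitem
termination_by pos
decreasing_by
  have : (pos - 1) / 2 ≤ pos - 1 := Nat.div_le_self _ _
  omega

def hpSiftup {α : Type} (lt : α → α → Bool) (newitem : α) (heap : List α)
    (startpos pos : Nat) : List α :=
  let childpos := 2 * pos + 1
  if _h : childpos < heap.length then
    let childpos' :=
      if childpos + 1 < heap.length ∧
          lt (heap.getD childpos newitem) (heap.getD (childpos + 1) newitem) = false
      then childpos + 1 else childpos
    hpSiftup lt newitem (heap.set pos (heap.getD childpos' newitem)) startpos childpos'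
  else hpSiftdown lt newitem (heap.set pos newitem) startpos pos
termination_by heap.length - pos
decreasing_by
  simp only [List.length_set]
  split <;> omega

-- _siftup(heap, pos) as called by heapify: newitem = heap[pos]
def hpSiftupAt {α : Type} (lt : α → α → Bool) (heap : List α) (pos : Nat) : List α :=
  match heap[pos]? with
  | some newitem => hpSiftup lt newitem heap pos pos
  | none => heap

def hpHeapify {α : Type} (lt : α → α → Bool) (heap : List α) : List α :=
  (List.range (heap.length / 2)).reverse.foldl (fun h i => hpSiftupAt lt h i) heap

def hpPush {α : Type} (lt : α → α → Bool) (heap : List α) (item : α) : List α :=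
  hpSiftdown lt item (heap ++ [item]) 0 heap.length

def hpPop {α : Type} (lt : α → α → Bool) (heap : List α) : Option (α × List α) :=
  match heap.getLast? with
  | none => none            -- IndexError in Python
  | some lastelt =>
    let rest := heap.dropLast
    if rest.isEmpty then some (lastelt, rest)
    else some (rest.getD 0 lastelt, hpSiftup lt lastelt (rest.set 0 lastelt) 0 0)

-- Python's `<` on str / on the 2-element lists [numero, codigo] / on heap elements
-- [freq, [n1, c1], [n2, c2], ...] (modelled as freq × list of pairs).
def lcLt (a b : List Char) : Bool := decide (a < b)

def pairLt (p q : (List Char) × (List Char)) : Bool :=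
  if p.1 == q.1 then lcLt p.2 q.2 else lcLt p.1 q.1

def pairsLt : List ((List Char) × (List Char)) → List ((List Char) × (List Char)) → Bool
  | [], [] => false
  | [], _ :: _ => true
  | _ :: _, [] => false
  | p :: ps, q :: qs => if p == q then pairsLt ps qs else pairLt p q

def ltA (a b : Int × List ((List Char) × (List Char))) : Bool :=
  if a.1 == b.1 then pairsLt a.2 b.2 else decide (a.1 < b.1)

-- while len(heap) > 1: lo = heappop; hi = heappop; prefix lo's codes with '0',
-- hi's with '1'; heappush [lo[0]+hi[0]] + lo[1:] + hi[1:].  (fuel = initial size.)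
def mergeLoopA : Nat → List (Int × List ((List Char) × (List Char))) →
    List (Int × List ((List Char) × (List Char)))
  | 0, h => h
  | fuel + 1, h =>
    if h.length > 1 then
      match hpPop ltA h with
      | none => h
      | some (lo, h1) =>
        match hpPop ltA h1 with
        | none => h1
        | some (hi, h2) =>
          let lo2 := lo.2.map (fun pr => (pr.1, '0' :: pr.2))
          let hi2 := hi.2.map (fun pr => (pr.1, '1' :: pr.2))
          mergeLoopA fuel (hpPush ltA h2 (lo.1 + hi.1, lo2 ++ hi2))
    else h

-- Port of A.  Characters and code strings are handled as List Char (PySem's string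
-- representation) and packed into String at the very end.  The unreachable `none`
-- defaults are Python's IndexError on the empty input (excluded by Pre_).
def codificar_huffman (cadena : String) : String × (List (String × String)) :=
  let frecuencias := cadena.toList.foldl
    (fun d c => d.modify [c] 0 (· + 1)) (PySem.Dict.empty : PySem.Dict (List Char) Int)
  let heap0 := frecuencias.items.map (fun nf => (nf.2, [(nf.1, ([] : List Char))]))
  let heap1 := hpHeapify ltA heap0
  let heapF := mergeLoopA heap1.length heap1
  match hpPop ltA heapF with
  | none => ("", [])
  | some (root, _) =>
    let arbol := PySem.List.sorted root.2
      (fun p => toLex ((p.2.length : Nat), toLex (p.1, p.2))) false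
    let codigos := arbol.foldl (fun d pr => d.insert pr.1 pr.2)
      (PySem.Dict.empty : PySem.Dict (List Char) (List Char))
    let encoded := PySem.Chars.join [] (cadena.toList.map (fun c => codigos.getD [c] []))
    (String.ofList encoded, codigos.items.map (fun pr => (String.ofList pr.1, String.ofList pr.2)))

-- ===== PORT B =====
inductive HTree
  | leaf : List Char → HTree
  | node : HTree → HTree → HTree
deriving DecidableEq, Repr

-- Python's `<` on the (freq, char) tuples of B's heap.
def ltB (a b : Int × List Char) : Bool :=
  if a.1 == b.1 then lcLt a.2 b.2 else decide (a.1 < b.1)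

def dfsB : HTree → List Char → List ((List Char) × (List Char))
  | .leaf c, codigo => [(c, codigo)]
  | .node l r, codigo => dfsB l (codigo ++ ['0']) ++ dfsB r (codigo ++ ['1'])

def mergeLoopB : Nat → List (Int × List Char) → PySem.Dict (List Char) HTree →
    (List (Int × List Char)) × PySem.Dict (List Char) HTree
  | 0, h, ar => (h, ar)
  | fuel + 1, h, ar =>
    if h.length > 1 then
      match hpPop ltB h with
      | none => (h, ar)
      | some ((f1, c1), h1) =>
        match hpPop ltB h1 with
        | none => (h1, ar)
        | some ((f2, c2), h2) =>
          match ar.pop? c2 with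
          | none => (h2, ar)        -- KeyError in Python (unreachable)
          | some (t2, ar1) =>
            let ar2 := ar1.insert c1 (HTree.node (ar1.getD c1 (HTree.leaf c1)) t2)
            mergeLoopB fuel (hpPush ltB h2 (f1 + f2, c1)) ar2
    else (h, ar)

def codificar_huffman_alt (cadena : String) : String × (List (String × String)) :=
  let frec := PySem.Dict.counter (cadena.toList.map (fun c => [c]))
  let arboles0 := frec.keys.foldl (fun d c => d.insert c (HTree.leaf c))
    (PySem.Dict.empty : PySem.Dict (List Char) HTree)
  let heap0 := frec.items.map (fun nf => (nf.2, nf.1))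
  let heap1 := hpHeapify ltB heap0
  let st := mergeLoopB heap1.length heap1 arboles0
  match PySem.List.pyGet? st.1 0 with
  | none => ("", [])
  | some fc =>
    let raiz := st.2.getD fc.2 (HTree.leaf fc.2)
    let pares := dfsB raiz []
    let codigos := PySem.Dict.ofList (PySem.List.sorted pares
      (fun p => toLex ((p.2.length : Nat), toLex (p.1, p.2))) false)
    let encoded := PySem.Chars.join [] (cadena.toList.map (fun c => codigos.getD [c] []))
    (String.ofList encoded, codigos.items.map (fun pr => (String.ofList pr.1, String.ofList pr.2)))

-- ===== PRECONDITION & SPEC =====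
-- Pre_ excludes only the empty string, on which A raises IndexError (heappop of an empty heap).
def Pre_codificar_huffman (cadena : String) : Prop := cadena ≠ ""
instance (cadena : String) : Decidable (Pre_codificar_huffman cadena) := by
  unfold Pre_codificar_huffman; infer_instance

def pvWitness_codificar_huffman : String := "abracadabra"

def Spec_codificar_huffman (cadena : String) (out : String × (List (String × String))) : Prop :=
  out = codificar_huffman_alt cadena
instance (cadena : String) (out : String × (List (String × String))) :
    Decidable (Spec_codificar_huffman cadena out) := by
  unfold Spec_codificar_huffman; infer_instance

-- ===== CLAIM (what is proved, stated in full; the proofs are below) =====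
def Claim_equal_codificar_huffman : Prop :=
  ∀ (cadena : String), Dom_codificar_huffman cadena → Pre_codificar_huffman cadena →
    Spec_codificar_huffman cadena (codificar_huffman cadena)

-- ===== LEMMAS AND PROOFS =====

-- proof-side helpers
def leftmost : HTree → List Char
  | .leaf c => c
  | .node l _ => leftmost l

def pairsA : HTree → List ((List Char) × (List Char))
  | .leaf c => [(c, [])]
  | .node l r =>
      (pairsA l).map (fun pr => (pr.1, '0' :: pr.2)) ++
      (pairsA r).map (fun pr => (pr.1, '1' :: pr.2))

def embF (ar : PySem.Dict (List Char) HTree) (e : Int × List Char) :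
    Int × List ((List Char) × (List Char)) :=
  (e.1, pairsA (ar.getD e.2 (HTree.leaf e.2)))


-- --- generic heap lemmas: map commutation, lengths, permutation ---
theorem hpSiftdown_map {α β : Type} (f : β → α) (la : α → α → Bool) (lb : β → β → Bool)
    (H : ∀ u v, la (f u) (f v) = lb u v) (x : β) (h : List β) (s p : Nat) :
    hpSiftdown la (f x) (h.map f) s p = (hpSiftdown lb x h s p).map f := by
  fun_induction hpSiftdown lb x h s p with
  | case1 heap pos hp pp par hlt ih =>
    rw [hpSiftdown]
    simp only [dif_pos hp, List.getD_map, H]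
    rw [if_pos (show lb x (heap.getD ((pos - 1) / 2) x) = true from hlt), ← List.map_set]
    exact ih
  | case2 heap pos hp pp par hlt =>
    rw [hpSiftdown]
    simp only [dif_pos hp, List.getD_map, H]
    rw [if_neg (show ¬lb x (heap.getD ((pos - 1) / 2) x) = true from hlt), List.map_set]
  | case3 heap pos hnp =>
    rw [hpSiftdown]
    simp only [dif_neg hnp, List.map_set]
theorem hpSiftup_map {α β : Type} (f : β → α) (la : α → α → Bool) (lb : β → β → Bool)
    (H : ∀ u v, la (f u) (f v) = lb u v) (x : β) (h : List β) (s p : Nat) :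
    hpSiftup la (f x) (h.map f) s p = (hpSiftup lb x h s p).map f := by
  fun_induction hpSiftup lb x h s p with
  | case1 heap pos cp hcp cp' ih =>
    rw [hpSiftup]
    simp only [List.length_map, List.getD_map, H]
    rw [dif_pos (show 2 * pos + 1 < heap.length from hcp)]
    have hcpeq : (if 2 * pos + 1 + 1 < heap.length ∧
        lb (heap.getD (2 * pos + 1) x) (heap.getD (2 * pos + 1 + 1) x) = false
        then 2 * pos + 1 + 1 else 2 * pos + 1) = cp' := rfl
    rw [hcpeq, ← List.map_set]
    exact ih
  | case2 heap pos cp hcp =>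
    rw [hpSiftup]
    simp only [List.length_map]
    rw [dif_neg (show ¬2 * pos + 1 < heap.length from hcp), ← List.map_set]
    exact hpSiftdown_map f la lb H x (heap.set pos x) s pos
theorem len_hpSiftdown {α : Type} (lt : α → α → Bool) (x : α) (h : List α) (s p : Nat) :
    (hpSiftdown lt x h s p).length = h.length := by
  fun_induction hpSiftdown lt x h s p <;> simp_all

theorem len_hpSiftup {α : Type} (lt : α → α → Bool) (x : α) (h : List α) (s p : Nat) :
    (hpSiftup lt x h s p).length = h.length := by
  fun_induction hpSiftup lt x h s p <;> simp_all [len_hpSiftdown]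

theorem hpPop_eq_none_iff {α : Type} (lt : α → α → Bool) (h : List α) :
    hpPop lt h = none ↔ h = [] := by
  unfold hpPop
  cases hl : h.getLast? with
  | none => simp [List.getLast?_eq_none_iff.mp hl]
  | some lastelt =>
    have hne : h ≠ [] := by rintro rfl; simp at hl
    simp only
    constructor
    · intro hc; split at hc <;> simp at hc
    · intro hc; exact absurd hc hne

theorem len_hpPop {α : Type} (lt : α → α → Bool) (h : List α) (x : α) (h' : List α)
    (hp : hpPop lt h = some (x, h')) : h'.length + 1 = h.length := by
  unfold hpPop at hp
  cases hl : h.getLast? with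
  | none => simp [hl] at hp
  | some lastelt =>
    have hne : h ≠ [] := by rintro rfl; simp at hl
    have hpos : 0 < h.length := List.length_pos_of_ne_nil hne
    rw [hl] at hp
    simp only at hp
    split at hp
    · simp only [Option.some_inj, Prod.mk.injEq] at hp
      rw [← hp.2]
      simp only [List.length_dropLast]
      omega
    · simp only [Option.some_inj, Prod.mk.injEq] at hp
      rw [← hp.2]
      simp only [len_hpSiftup, List.length_set, List.length_dropLast]
      omega

theorem hpSiftupAt_map {α β : Type} (f : β → α) (la : α → α → Bool) (lb : β → β → Bool)
    (H : ∀ u v, la (f u) (f v) = lb u v) (h : List β) (p : Nat) :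
    hpSiftupAt la (h.map f) p = (hpSiftupAt lb h p).map f := by
  unfold hpSiftupAt
  cases hg : h[p]? with
  | none => simp [List.getElem?_map, hg]
  | some x =>
    simp only [List.getElem?_map, hg, Option.map_some]
    exact hpSiftup_map f la lb H x h p p

theorem hpHeapify_map {α β : Type} (f : β → α) (la : α → α → Bool) (lb : β → β → Bool)
    (H : ∀ u v, la (f u) (f v) = lb u v) (h : List β) :
    hpHeapify la (h.map f) = (hpHeapify lb h).map f := by
  unfold hpHeapify
  rw [List.length_map]
  generalize (List.range (h.length / 2)).reverse = is
  induction is generalizing h with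
  | nil => rfl
  | cons i t ih =>
    simp only [List.foldl_cons]
    rw [hpSiftupAt_map f la lb H]
    exact ih (hpSiftupAt lb h i)

theorem hpPush_map {α β : Type} (f : β → α) (la : α → α → Bool) (lb : β → β → Bool)
    (H : ∀ u v, la (f u) (f v) = lb u v) (h : List β) (x : β) :
    hpPush la (h.map f) (f x) = (hpPush lb h x).map f := by
  unfold hpPush
  rw [List.length_map]
  rw [show List.map f h ++ [f x] = List.map f (h ++ [x]) by simp]
  exact hpSiftdown_map f la lb H x (h ++ [x]) 0 h.length

theorem hpPop_map {α β : Type} (f : β → α) (la : α → α → Bool) (lb : β → β → Bool)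
    (H : ∀ u v, la (f u) (f v) = lb u v) (h : List β) :
    hpPop la (h.map f) = (hpPop lb h).map (fun r => (f r.1, r.2.map f)) := by
  unfold hpPop
  rw [List.getLast?_map]
  cases hl : h.getLast? with
  | none => rfl
  | some lastelt =>
    simp only [Option.map_some, ← List.map_dropLast, List.isEmpty_map]
    split
    · rfl
    · simp only [Option.map_some, List.getD_map, ← List.map_set]
      rw [hpSiftup_map f la lb H]
theorem count_set' {α : Type} [DecidableEq α] (l : List α) (n : Nat) (b a : α) (h : n < l.length) :
    (l.set n b).count a + (if l.getD n b = a then 1 else 0) = l.count a + (if b = a then 1 else 0) := by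
  induction l generalizing n with
  | nil => simp at h
  | cons x t ih =>
    cases n with
    | zero =>
      simp only [List.set_cons_zero, List.count_cons, List.getD_cons_zero, beq_iff_eq]
      split <;> split <;> omega
    | succ m =>
      simp only [List.set_cons_succ, List.count_cons, List.getD_cons_succ, beq_iff_eq]
      have := ih m (by simpa using h)
      split <;> omega

theorem set_set_perm {α : Type} [DecidableEq α] (l : List α) (p q : Nat) (x : α)
    (hp : p < l.length) (hq : q < l.length) (hne : p ≠ q) :
    ((l.set p (l.getD q x)).set q x).Perm (l.set p x) := by
  rw [List.perm_iff_count]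
  intro a
  have h1 := count_set' (l.set p (l.getD q x)) q x a (by simpa using hq)
  have h2 := count_set' l p (l.getD q x) a hp
  have h3 := count_set' l p x a hp
  have hgq : (l.set p (l.getD q x)).getD q x = l.getD q x :=
    (List.getD_eq_getElem _ _ (by simpa using hq)).trans
      ((List.getElem_set_ne hne _).trans (List.getD_eq_getElem l x hq).symm)
  have hgp : l.getD p (l.getD q x) = l.getD p x := by
    rw [List.getD_eq_getElem _ _ hp, List.getD_eq_getElem _ _ hp]
  simp only [hgq] at h1
  simp only [hgp] at h2
  omega

theorem hpSiftdown_perm {α : Type} [DecidableEq α] (lt : α → α → Bool) (x : α) (h : List α)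
    (s p : Nat) (hp : p < h.length) : (hpSiftdown lt x h s p).Perm (h.set p x) := by
  fun_induction hpSiftdown lt x h s p with
  | case1 heap pos hsp pp par hlt ih =>
    have hpp : (pos - 1) / 2 < heap.length := by
      have : (pos - 1) / 2 ≤ pos - 1 := Nat.div_le_self _ _
      omega
    have := ih (by simpa using hpp)
    exact this.trans (set_set_perm heap pos ((pos - 1) / 2) x hp hpp (by
      have : (pos - 1) / 2 ≤ pos - 1 := Nat.div_le_self _ _
      omega))
  | case2 heap pos hsp pp par hlt => exact List.Perm.refl _
  | case3 heap pos hnp => exact List.Perm.refl _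

theorem hpSiftup_perm {α : Type} [DecidableEq α] (lt : α → α → Bool) (x : α) (h : List α)
    (s p : Nat) (hp : p < h.length) : (hpSiftup lt x h s p).Perm (h.set p x) := by
  fun_induction hpSiftup lt x h s p with
  | case1 heap pos cp hcp cp' ih =>
    have hcp' : cp' < heap.length := by
      simp only [cp']
      split <;> omega
    have hne : pos ≠ cp' := by
      simp only [cp']
      split <;> omega
    have := ih (by simpa using hcp')
    exact this.trans (set_set_perm heap pos cp' x hp hcp' hne)
  | case2 heap pos cp hcp =>
    have := hpSiftdown_perm lt x (heap.set pos x) s pos (by simpa using hp)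
    rw [List.set_set] at this
    exact this

theorem hpSiftupAt_perm {α : Type} [DecidableEq α] (lt : α → α → Bool) (h : List α) (p : Nat) :
    (hpSiftupAt lt h p).Perm h := by
  unfold hpSiftupAt
  cases hg : h[p]? with
  | none => exact List.Perm.refl _
  | some x =>
    have hlt : p < h.length := by
      by_contra hc
      rw [List.getElem?_eq_none (Nat.le_of_not_lt hc)] at hg
      simp at hg
    have := hpSiftup_perm lt x h p p hlt
    have hx : x = h[p] := by
      have := hg
      rw [List.getElem?_eq_getElem hlt] at this
      exact (Option.some_inj.mp this).symm
    rw [hx, List.set_getElem_self] at this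
    show (hpSiftup lt x h p p).Perm h
    rw [hx]
    exact this

theorem hpHeapify_perm {α : Type} [DecidableEq α] (lt : α → α → Bool) (h : List α) :
    (hpHeapify lt h).Perm h := by
  unfold hpHeapify
  generalize (List.range (h.length / 2)).reverse = is
  induction is generalizing h with
  | nil => exact List.Perm.refl _
  | cons i t ih =>
    simp only [List.foldl_cons]
    exact (ih (hpSiftupAt lt h i)).trans (hpSiftupAt_perm lt h i)

theorem hpPush_perm {α : Type} [DecidableEq α] (lt : α → α → Bool) (h : List α) (x : α) :
    (hpPush lt h x).Perm (x :: h) := by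
  unfold hpPush
  have h1 := hpSiftdown_perm lt x (h ++ [x]) 0 h.length (by simp)
  have h2 : (h ++ [x]).set h.length x = h ++ [x] := by
    rw [List.set_append]
    simp
  rw [h2] at h1
  exact h1.trans (List.perm_append_singleton x h)

theorem hpPop_perm {α : Type} [DecidableEq α] (lt : α → α → Bool) (h : List α) (x : α)
    (h' : List α) (hp : hpPop lt h = some (x, h')) : (x :: h').Perm h := by
  unfold hpPop at hp
  cases hl : h.getLast? with
  | none => simp [hl] at hp
  | some lastelt =>
    have hne : h ≠ [] := by rintro rfl; simp at hl
    have hdec : h = h.dropLast ++ [lastelt] := by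
      conv_lhs => rw [← List.dropLast_append_getLast hne]
      rw [List.getLast?_eq_some_getLast hne] at hl
      simp [Option.some_inj.mp hl]
    rw [hl] at hp
    simp only at hp
    split at hp
    · rename_i hemp
      simp only [Option.some_inj, Prod.mk.injEq] at hp
      rw [← hp.1, ← hp.2]
      rw [List.isEmpty_iff] at hemp
      rw [hemp]
      conv_rhs => rw [hdec, hemp]
      exact List.Perm.refl _
    · rename_i hemp
      rw [List.isEmpty_iff] at hemp
      have hrl : 0 < h.dropLast.length := List.length_pos_of_ne_nil hemp
      simp only [Option.some_inj, Prod.mk.injEq] at hp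
      have hperm := hpSiftup_perm lt lastelt (h.dropLast.set 0 lastelt) 0 0 (by simpa using hrl)
      rw [List.set_set] at hperm
      rw [← hp.1, ← hp.2]
      refine List.Perm.trans ?_ (by rw [← hdec] : (h.dropLast ++ [lastelt]).Perm h)
      have step1 : (h.dropLast.getD 0 lastelt :: hpSiftup lt lastelt (h.dropLast.set 0 lastelt) 0 0).Perm
          (h.dropLast.getD 0 lastelt :: h.dropLast.set 0 lastelt) := List.Perm.cons _ hperm
      refine step1.trans ?_
      obtain ⟨y, t, hyt⟩ := List.exists_cons_of_ne_nil hemp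
      rw [hyt]
      simp only [List.getD_cons_zero, List.set_cons_zero]
      exact (List.Perm.swap lastelt y t).trans (List.perm_append_singleton _ _).symm

theorem hpPop_fst {α : Type} (lt : α → α → Bool) (h : List α) (x : α) (h' : List α)
    (hp : hpPop lt h = some (x, h')) : some x = h[0]? := by
  unfold hpPop at hp
  cases hl : h.getLast? with
  | none => simp [hl] at hp
  | some lastelt =>
    have hne : h ≠ [] := by rintro rfl; simp at hl
    rw [hl] at hp
    simp only at hp
    split at hp
    · rename_i hemp
      rw [List.isEmpty_iff] at hemp
      simp only [Option.some_inj, Prod.mk.injEq] at hp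
      have hdec : h = h.dropLast ++ [lastelt] := by
        conv_lhs => rw [← List.dropLast_append_getLast hne]
        rw [List.getLast?_eq_some_getLast hne] at hl
        simp [Option.some_inj.mp hl]
      rw [hdec, hemp, ← hp.1]
      rfl
    · rename_i hemp
      rw [List.isEmpty_iff] at hemp
      have hrl : 0 < h.dropLast.length := List.length_pos_of_ne_nil hemp
      simp only [Option.some_inj, Prod.mk.injEq] at hp
      have hl0 : 0 < h.length := List.length_pos_of_ne_nil hne
      rw [← hp.1, List.getD_eq_getElem _ _ hrl, List.getElem_dropLast,
        List.getElem?_eq_getElem hl0]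

-- --- comparison agreement between A's heap elements and B's (freq, char) keys ---
theorem pairsLt_self (ps : List ((List Char) × (List Char))) : pairsLt ps ps = false := by
  induction ps with
  | nil => rfl
  | cons p t ih => simp [pairsLt, ih]

theorem pairsA_cons (t : HTree) :
    ∃ cd tl, pairsA t = (leftmost t, cd) :: tl := by
  induction t with
  | leaf c => exact ⟨[], [], rfl⟩
  | node l r ihl ihr =>
    obtain ⟨cd, tl, hl⟩ := ihl
    exact ⟨'0' :: cd, tl.map (fun pr => (pr.1, '0' :: pr.2)) ++
      (pairsA r).map (fun pr => (pr.1, '1' :: pr.2)), by simp [pairsA, hl, leftmost]⟩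

theorem leftmost_getD (ar : PySem.Dict (List Char) HTree)
    (hI2 : ∀ c t, ar.get? c = some t → leftmost t = c) (c : List Char) :
    leftmost (ar.getD c (HTree.leaf c)) = c := by
  unfold PySem.Dict.getD
  cases hg : ar.get? c with
  | none => rfl
  | some t => exact hI2 c t hg

theorem ltAB (ar : PySem.Dict (List Char) HTree)
    (hI2 : ∀ c t, ar.get? c = some t → leftmost t = c) :
    ∀ u v, ltA (embF ar u) (embF ar v) = ltB u v := by
  intro u v
  unfold ltA ltB embF
  simp only
  by_cases hf : u.1 == v.1
  · simp only [hf, if_true]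
    by_cases hc : u.2 = v.2
    · rw [hc]
      rw [pairsLt_self]
      simp [lcLt]
    · obtain ⟨cd, tl, hu⟩ := pairsA_cons (ar.getD u.2 (HTree.leaf u.2))
      obtain ⟨cd', tl', hv⟩ := pairsA_cons (ar.getD v.2 (HTree.leaf v.2))
      rw [leftmost_getD ar hI2] at hu hv
      rw [hu, hv]
      unfold pairsLt
      have hne : ((u.2, cd) == (v.2, cd')) = false := by
        simp [Prod.ext_iff]
        intro h; exact absurd h hc
      rw [hne]
      simp only [Bool.false_eq_true, if_false, pairLt]
      have : ((u.2 : List Char) == v.2) = false := by simp [hc]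
      simp [this]
  · simp [hf]

-- --- Dict facts about erase (Python's dict.pop) ---
theorem get?_erase_of_ne {ν : Type} (d : PySem.Dict (List Char) ν) (k k' : List Char)
    (hne : k' ≠ k) : (d.erase k).get? k' = d.get? k' := by
  unfold PySem.Dict.erase PySem.Dict.get?
  simp only
  induction d.items with
  | nil => rfl
  | cons p t ih =>
    by_cases hpk : p.1 = k
    · have h1 : (!p.1 == k) = false := by simp [hpk]
      have h2 : (p.1 == k') = false := by simp [hpk, Ne.symm hne]
      rw [List.filter_cons, h1, if_neg (by simp), List.find?_cons, h2]
      exact ih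
    · have h1 : (!p.1 == k) = true := by simp [hpk]
      rw [List.filter_cons, h1, if_pos rfl, List.find?_cons, List.find?_cons]
      cases hpk' : (p.1 == k') with
      | true => rfl
      | false => exact ih

theorem get?_erase_self {ν : Type} (d : PySem.Dict (List Char) ν) (k : List Char) :
    (d.erase k).get? k = none := by
  unfold PySem.Dict.erase PySem.Dict.get?
  simp only
  induction d.items with
  | nil => rfl
  | cons p t ih =>
    by_cases hpk : p.1 = k
    · have h1 : (!p.1 == k) = false := by simp [hpk]
      rw [List.filter_cons, h1, if_neg (by simp)]
      exact ih
    · have h1 : (!p.1 == k) = true := by simp [hpk]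
      have h2 : (p.1 == k) = false := by simp [hpk]
      rw [List.filter_cons, h1, if_pos rfl, List.find?_cons, h2]
      exact ih

theorem contains_erase_of_ne {ν : Type} (d : PySem.Dict (List Char) ν) (k k' : List Char)
    (hne : k' ≠ k) (hc : d.contains k' = true) : (d.erase k).contains k' = true := by
  rw [PySem.Dict.contains_eq_isSome_get?] at hc ⊢
  rw [get?_erase_of_ne d k k' hne]
  exact hc

-- --- B's DFS computes exactly A's accumulated pair lists ---
theorem dfsB_eq (t : HTree) (code : List Char) :
    dfsB t code = (pairsA t).map (fun p => (p.1, code ++ p.2)) := by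
  induction t generalizing code with
  | leaf c => simp [dfsB, pairsA]
  | node l r ihl ihr =>
    simp only [dfsB, pairsA, ihl, ihr, List.map_append, List.map_map]
    congr 1 <;> (apply List.map_congr_left; intro p hp; simp)

theorem dfsB_nil (t : HTree) : dfsB t [] = pairsA t := by
  rw [dfsB_eq]
  simp

-- --- the initial tree dict: every key maps to its leaf ---
theorem arboles0_get? (ks : List (List Char)) (d : PySem.Dict (List Char) HTree)
    (hd : ∀ c t, d.get? c = some t → t = HTree.leaf c) (c : List Char) (t : HTree) :
    (ks.foldl (fun d c => d.insert c (HTree.leaf c)) d).get? c = some t → t = HTree.leaf c := by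
  induction ks generalizing d with
  | nil => exact hd c t
  | cons k kt ih =>
    simp only [List.foldl_cons]
    refine ih _ ?_
    intro c' t' hg
    rw [PySem.Dict.get?_insert] at hg
    split at hg
    · rename_i hq; rw [hq]; exact (Option.some_inj.mp hg).symm
    · exact hd c' t' hg

theorem contains_foldl_insert (ks : List (List Char)) (d : PySem.Dict (List Char) HTree)
    (c : List Char) (hc : d.contains c = true) :
    (ks.foldl (fun d c => d.insert c (HTree.leaf c)) d).contains c = true := by
  induction ks generalizing d with
  | nil => exact hc
  | cons k kt ih =>
    simp only [List.foldl_cons]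
    exact ih _ (by simp [PySem.Dict.contains_insert, hc])

theorem arboles0_contains (ks : List (List Char)) (d : PySem.Dict (List Char) HTree)
    (c : List Char) (hc : c ∈ ks) :
    (ks.foldl (fun d c => d.insert c (HTree.leaf c)) d).contains c = true := by
  induction ks generalizing d with
  | nil => simp at hc
  | cons k kt ih =>
    simp only [List.foldl_cons]
    rcases List.mem_cons.mp hc with h | h
    · subst h
      by_cases hm : c ∈ kt
      · exact ih _ hm
      · exact contains_foldl_insert kt _ c (PySem.Dict.contains_insert_self d c (HTree.leaf c))
    · exact ih _ h

-- --- the two merge loops run in lockstep ---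
theorem lockstep (fuel : Nat) (hB : List (Int × List Char)) (ar : PySem.Dict (List Char) HTree)
    (hI2 : ∀ c t, ar.get? c = some t → leftmost t = c)
    (hI3 : (hB.map (fun e => e.2)).Nodup)
    (hI4 : ∀ e ∈ hB, ar.contains e.2 = true) :
    mergeLoopA fuel (hB.map (embF ar)) =
      (mergeLoopB fuel hB ar).1.map (embF (mergeLoopB fuel hB ar).2) := by
  induction fuel generalizing hB ar with
  | zero => rfl
  | succ fuel ih =>
    by_cases hlen : hB.length > 1
    case neg =>
      simp only [mergeLoopA, mergeLoopB, List.length_map]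
      rw [if_neg hlen, if_neg hlen]
    case pos =>
    -- first pop
    obtain ⟨⟨⟨f1, c1⟩, h1⟩, hpop1⟩ : ∃ r, hpPop ltB hB = some r := by
      cases hp : hpPop ltB hB with
      | none => rw [hpPop_eq_none_iff] at hp; subst hp; simp at hlen
      | some r => exact ⟨r, rfl⟩
    have hlen1 : h1.length + 1 = hB.length := len_hpPop ltB hB _ _ hpop1
    -- second pop
    obtain ⟨⟨⟨f2, c2⟩, h2⟩, hpop2⟩ : ∃ r, hpPop ltB h1 = some r := by
      cases hp : hpPop ltB h1 with
      | none => rw [hpPop_eq_none_iff] at hp; subst hp; simp at hlen1; omega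
      | some r => exact ⟨r, rfl⟩
    -- permutation and distinctness bookkeeping
    have perm0 : ((f1, c1) :: h1).Perm hB := hpPop_perm ltB hB _ _ hpop1
    have perm1 : ((f2, c2) :: h2).Perm h1 := hpPop_perm ltB h1 _ _ hpop2
    have perm12 : ((f1, c1) :: (f2, c2) :: h2).Perm hB := (perm1.cons (f1, c1)).trans perm0
    have hnodAll : (((f1, c1) :: (f2, c2) :: h2).map (fun e => e.2)).Nodup :=
      ((perm12.map (fun e => e.2)).nodup_iff).mpr hI3
    simp only [List.map_cons, List.nodup_cons, List.mem_cons, List.mem_map] at hnodAll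
    have hc12 : c1 ≠ c2 := fun hc => hnodAll.1 (Or.inl hc)
    have hc1 : ∀ e ∈ h2, e.2 ≠ c1 := by
      intro e he hc
      exact hnodAll.1 (Or.inr ⟨e, he, hc⟩)
    have hc2 : ∀ e ∈ h2, e.2 ≠ c2 := by
      intro e he hc
      exact hnodAll.2.1 ⟨e, he, hc⟩
    have hsub : ∀ e ∈ h2, e ∈ hB := fun e he => perm12.subset (by simp [he])
    -- the tree popped for c2
    have hmem2 : (f2, c2) ∈ hB := perm12.subset (by simp)
    have hcon2 : ar.contains c2 = true := hI4 _ hmem2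
    obtain ⟨t2, hg2⟩ : ∃ t, ar.get? c2 = some t := by
      rw [PySem.Dict.contains_eq_isSome_get?] at hcon2
      exact Option.isSome_iff_exists.mp hcon2
    have hpopq : ar.pop? c2 = some (t2, ar.erase c2) := by
      unfold PySem.Dict.pop?
      rw [hg2]
      rfl
    -- dict invariants after the update
    have hI2ar1 : ∀ c t, (ar.erase c2).get? c = some t → leftmost t = c := by
      intro c t hg
      by_cases hc : c = c2
      · rw [hc, get?_erase_self] at hg; simp at hg
      · rw [get?_erase_of_ne ar c2 c hc] at hg; exact hI2 c t hg
    set t1 := (ar.erase c2).getD c1 (HTree.leaf c1) with ht1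
    set ar2 := (ar.erase c2).insert c1 (HTree.node t1 t2) with har2
    have hI2' : ∀ c t, ar2.get? c = some t → leftmost t = c := by
      intro c t hg
      rw [har2, PySem.Dict.get?_insert] at hg
      split at hg
      · rename_i hq
        rw [hq, ← Option.some_inj.mp hg]
        show leftmost t1 = c1
        rw [ht1]
        exact leftmost_getD _ hI2ar1 c1
      · exact hI2ar1 c t hg
    -- the pushed A element is the embedding of the pushed B element
    have hgetd1 : ar.getD c1 (HTree.leaf c1) = t1 := by
      rw [ht1]
      unfold PySem.Dict.getD
      rw [get?_erase_of_ne ar c2 c1 hc12]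
    have hgetd2 : ar.getD c2 (HTree.leaf c2) = t2 := by
      unfold PySem.Dict.getD
      rw [hg2]
      rfl
    have hembpush : embF ar2 (f1 + f2, c1) =
        (f1 + f2,
          (pairsA t1).map (fun pr => (pr.1, '0' :: pr.2)) ++
          (pairsA t2).map (fun pr => (pr.1, '1' :: pr.2))) := by
      unfold embF
      simp only
      congr 1
      have : ar2.getD c1 (HTree.leaf c1) = HTree.node t1 t2 := by
        rw [har2]
        unfold PySem.Dict.getD
        rw [PySem.Dict.get?_insert_self]
        rfl
      rw [this]
      rfl
    -- h2's embedding is unchanged by the dict update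
    have hstable : h2.map (embF ar) = h2.map (embF ar2) := by
      apply List.map_congr_left
      intro e he
      unfold embF
      congr 2
      unfold PySem.Dict.getD
      rw [har2, PySem.Dict.get?_insert_of_ne _ _ (hc1 e he),
        get?_erase_of_ne ar c2 e.2 (hc2 e he)]
    -- invariants for the recursive call
    have hI3' : ((hpPush ltB h2 (f1 + f2, c1)).map (fun e => e.2)).Nodup := by
      have hperm := (hpPush_perm ltB h2 (f1 + f2, c1)).map (fun e => e.2)
      rw [hperm.nodup_iff]
      simp only [List.map_cons, List.nodup_cons, List.mem_map]
      refine ⟨fun ⟨e, he, hc⟩ => hnodAll.1 (Or.inr ⟨e, he, hc⟩), ?_⟩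
      have := hnodAll.2.2
      simpa using this
    have hI4' : ∀ e ∈ hpPush ltB h2 (f1 + f2, c1), ar2.contains e.2 = true := by
      intro e he
      have := (hpPush_perm ltB h2 (f1 + f2, c1)).subset he
      rcases List.mem_cons.mp this with h | h
      · rw [h, har2]
        exact PySem.Dict.contains_insert_self _ _ _
      · rw [har2, PySem.Dict.contains_insert]
        refine Bool.or_eq_true_iff.mpr (Or.inr ?_)
        exact contains_erase_of_ne ar c2 e.2 (hc2 e h) (hI4 e (hsub e h))
    -- A-side pops
    have hpopA1 : hpPop ltA (hB.map (embF ar)) =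
        some (embF ar (f1, c1), h1.map (embF ar)) := by
      rw [hpPop_map (embF ar) ltA ltB (ltAB ar hI2), hpop1]
      rfl
    have hpopA2 : hpPop ltA (h1.map (embF ar)) =
        some (embF ar (f2, c2), h2.map (embF ar)) := by
      rw [hpPop_map (embF ar) ltA ltB (ltAB ar hI2), hpop2]
      rfl
    -- A-side popped elements, reduced
    have hA1 : embF ar (f1, c1) = (f1, pairsA t1) := by
      unfold embF; rw [hgetd1]
    have hA2 : embF ar (f2, c2) = (f2, pairsA t2) := by
      unfold embF; rw [hgetd2]
    -- unfold one step of both loops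
    simp only [mergeLoopA, mergeLoopB, List.length_map]
    rw [if_pos hlen, if_pos hlen]
    simp only [hpopA1, hpop1, hpopA2, hpop2, hpopq, hA1, hA2]
    rw [← ht1, ← har2]
    rw [hstable, ← hembpush, hpPush_map (embF ar2) ltA ltB (ltAB ar2 hI2') h2 (f1 + f2, c1)]
    exact ih (hpPush ltB h2 (f1 + f2, c1)) ar2 hI2' hI3' hI4'

-- --- initial-state facts ---
theorem arboles0_getD (ks : List (List Char)) (c : List Char) :
    (ks.foldl (fun d c => d.insert c (HTree.leaf c))
      (PySem.Dict.empty : PySem.Dict (List Char) HTree)).getD c (HTree.leaf c) = HTree.leaf c := by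
  unfold PySem.Dict.getD
  cases hg : (ks.foldl (fun d c => d.insert c (HTree.leaf c)) PySem.Dict.empty).get? c with
  | none => rfl
  | some t =>
    have := arboles0_get? ks PySem.Dict.empty
      (by intro c' t' hg'; rw [PySem.Dict.get?_empty] at hg'; simp at hg') c t hg
    rw [this]
    rfl

theorem main_eq (cadena : String) : codificar_huffman cadena = codificar_huffman_alt cadena := by
  unfold codificar_huffman codificar_huffman_alt
  dsimp only
  rw [PySem.Dict.counter_eq_foldl, List.foldl_map]
  set F := cadena.toList.foldl (fun d c => d.modify [c] 0 (· + 1))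
    (PySem.Dict.empty : PySem.Dict (List Char) Int) with hF
  set ar0 := F.keys.foldl (fun d c => d.insert c (HTree.leaf c))
    (PySem.Dict.empty : PySem.Dict (List Char) HTree) with har0
  have hFc : F = PySem.Dict.counter (cadena.toList.map (fun c => [c])) := by
    rw [hF, PySem.Dict.counter_eq_foldl, List.foldl_map]
  have hkeys : F.keys.Nodup := by
    rw [hFc]
    exact PySem.Dict.nodup_keys_counter _
  have hI2_0 : ∀ c t, ar0.get? c = some t → leftmost t = c := by
    intro c t hg
    rw [arboles0_get? F.keys PySem.Dict.empty
      (by intro c' t' hg'; rw [PySem.Dict.get?_empty] at hg'; simp at hg') c t hg]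
    rfl
  -- the two initial heaps are embF-related
  have hemb0 : F.items.map (fun nf => (nf.2, [(nf.1, ([] : List Char))])) =
      (F.items.map (fun nf => (nf.2, nf.1))).map (embF ar0) := by
    rw [List.map_map]
    apply List.map_congr_left
    intro nf _
    unfold embF
    simp only [Function.comp_apply, har0, arboles0_getD]
    rfl
  rw [hemb0, hpHeapify_map (embF ar0) ltA ltB (ltAB ar0 hI2_0), List.length_map]
  set hB1 := hpHeapify ltB (F.items.map (fun nf => (nf.2, nf.1))) with hhB1
  -- invariants for the heapified initial heap
  have hpermB1 : hB1.Perm (F.items.map (fun nf => (nf.2, nf.1))) := hpHeapify_perm _ _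
  have hI3_1 : (hB1.map (fun e => e.2)).Nodup := by
    rw [(hpermB1.map (fun e => e.2)).nodup_iff, List.map_map]
    have : ((fun (e : Int × List Char) => e.2) ∘ (fun nf : (List Char) × Int => (nf.2, nf.1))) =
        (fun nf : (List Char) × Int => nf.1) := rfl
    rw [this]
    exact hkeys
  have hI4_1 : ∀ e ∈ hB1, ar0.contains e.2 = true := by
    intro e he
    have hmem := hpermB1.subset he
    obtain ⟨nf, hnf, hrfl⟩ := List.mem_map.mp hmem
    rw [har0]
    apply arboles0_contains
    rw [← hrfl]
    exact List.mem_map.mpr ⟨nf, hnf, rfl⟩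
  rw [lockstep hB1.length hB1 ar0 hI2_0 hI3_1 hI4_1]
  set st := mergeLoopB hB1.length hB1 ar0 with hst
  cases hst1 : st.1 with
  | nil => rfl
  | cons fc rest =>
    obtain ⟨r, hr⟩ : ∃ r, hpPop ltA ((fc :: rest).map (embF st.2)) = some r := by
      cases hp : hpPop ltA ((fc :: rest).map (embF st.2)) with
      | none => rw [hpPop_eq_none_iff] at hp; simp at hp
      | some r => exact ⟨r, rfl⟩
    have hfst : some r.1 = ((fc :: rest).map (embF st.2))[0]? := hpPop_fst _ _ _ _ hr
    simp only [List.map_cons, List.getElem?_cons_zero, Option.some_inj] at hfst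
    rw [hr]
    rw [PySem.List.pyGet?_zero_cons fc rest]
    simp only
    rw [hfst]
    unfold embF
    simp only
    rw [dfsB_nil]
    rfl

theorem codificar_huffman_spec : Claim_equal_codificar_huffman := by
  intro cadena _ _
  unfold Spec_codificar_huffman
  exact main_eq cadena
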